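-- pv_equiv track=rewrite | github.com/allensu0314/CS61A | lab/lab03/lab03_extra.py | ten_pairs
-- ===== SOURCE A (Python) =====
-- def ten_pairs(n):
--     """Return the number of ten-pairs within positive integer n.
--
--     >>> ten_pairs(7823952)
--     3
--     >>> ten_pairs(55055)
--     6
--     >>> ten_pairs(9641469)
--     6
--     """
--     def helper(n, i):
--         if n == 0:
--             return 0
--         if n%10 == i:
--             return 1+ helper(n//10, i)
--         return helper(n//10, i)
--     # easy solution..
--     return (helper(n, 1)*helper(n, 9) + helper(n, 2)*helper(n, 8) + helper(n, 3)*helper(n,7) +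
--            helper(n, 4)*helper(n, 6) + helper(n, 5)*(helper(n, 5)-1)//2)
--     # better sulution..
--     return ten_pairs(n//10) + helper(n//10, 10-n%10)
-- ===== SOURCE B (Python) =====
-- def ten_pairs(n):
--     """Return the number of ten-pairs within positive integer n."""
--     freq = [0] * 10
--     while n:
--         freq[n % 10] += 1
--         n //= 10
--     return (freq[1]*freq[9] + freq[2]*freq[8] + freq[3]*freq[7] +
--             freq[4]*freq[6] + freq[5]*(freq[5]-1)//2)
-- ===== Notes on version B (the rewrite author's own statement) =====
-- stated objective: simpler
-- what changed: Replaces nine separate recursive digit scans (one per digit value) by a single arithmetic pass that builds a digit-frequency table, then combines the counts with the same pairing formula.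
import Mathlib
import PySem

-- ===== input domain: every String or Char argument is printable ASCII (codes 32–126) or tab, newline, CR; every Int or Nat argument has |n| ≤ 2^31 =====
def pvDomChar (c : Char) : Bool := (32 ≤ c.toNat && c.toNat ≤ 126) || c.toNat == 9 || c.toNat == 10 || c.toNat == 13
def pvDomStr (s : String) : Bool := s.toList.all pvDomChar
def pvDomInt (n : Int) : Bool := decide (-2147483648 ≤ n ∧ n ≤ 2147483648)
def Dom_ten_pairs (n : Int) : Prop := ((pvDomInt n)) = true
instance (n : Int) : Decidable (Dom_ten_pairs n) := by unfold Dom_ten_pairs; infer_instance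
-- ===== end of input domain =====

-- B replaces A's nine recursive digit scans by one digit-frequency pass plus the same combining formula (objective: simpler).

-- ===== PORT A =====
-- A's inner recursive helper. The fuel argument (n.toNat + 1, always sufficient for n ≥ 0,
-- consumed one unit per n //= 10 step) only makes the Python recursion total in Lean;
-- on negative n Python recurses forever (RecursionError), excluded by Pre_.
def tpHelper : Nat → Int → Int → Int
  | 0, _, _ => 0
  | f + 1, n, i =>
    if n = 0 then 0
    else if PySem.Int.mod n 10 = i then 1 + tpHelper f (PySem.Int.floordiv n 10) i
    else tpHelper f (PySem.Int.floordiv n 10) i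

def ten_pairs (n : Int) : Int :=
  let h := fun i => tpHelper (n.toNat + 1) n i
  h 1 * h 9 + h 2 * h 8 + h 3 * h 7 + h 4 * h 6 +
    PySem.Int.floordiv (h 5 * (h 5 - 1)) 2

-- ===== PORT B =====
-- B's while loop; same fuel device as above. For n ≥ 0 the index n % 10 is in 0..9,
-- so List.set/getD at (n % 10).toNat is exactly Python's freq[n % 10].
def tpFreqLoop : Nat → Int → List Int → List Int
  | 0, _, freq => freq
  | f + 1, n, freq =>
    if n = 0 then freq
    else
      let d := (PySem.Int.mod n 10).toNat
      tpFreqLoop f (PySem.Int.floordiv n 10) (freq.set d (freq.getD d 0 + 1))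

def ten_pairs_alt (n : Int) : Int :=
  let freq := tpFreqLoop (n.toNat + 1) n (List.replicate 10 0)
  let g := fun j => freq.getD j 0
  g 1 * g 9 + g 2 * g 8 + g 3 * g 7 + g 4 * g 6 +
    PySem.Int.floordiv (g 5 * (g 5 - 1)) 2

-- ===== PRECONDITION & SPEC =====
-- Pre_ excludes negative n, on which Python A recurses without progress and raises RecursionError.
def Pre_ten_pairs (n : Int) : Prop := 0 ≤ n
instance (n : Int) : Decidable (Pre_ten_pairs n) := by unfold Pre_ten_pairs; infer_instance
def pvWitness_ten_pairs : Int := 7823952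

def Spec_ten_pairs (n : Int) (out : Int) : Prop := out = ten_pairs_alt n
instance (n : Int) (out : Int) : Decidable (Spec_ten_pairs n out) := by unfold Spec_ten_pairs; infer_instance

-- ===== CLAIM (what is proved, stated in full; the proofs are below) =====
def Claim_equal_ten_pairs : Prop := ∀ (n : Int), Dom_ten_pairs n → Pre_ten_pairs n → Spec_ten_pairs n (ten_pairs n)

-- ===== LEMMAS AND PROOFS =====

-- The frequency loop's entry j equals its initial value plus A's helper count for digit j.
theorem tpFreq_helper (f : Nat) (n : Int) (hn : 0 ≤ n) (freq : List Int)
    (hlen : freq.length = 10) (j : Nat) (hj : j < 10) :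
    (tpFreqLoop f n freq).getD j 0 = freq.getD j 0 + tpHelper f n (j : Int) := by
  induction f generalizing n freq with
  | zero => simp [tpFreqLoop, tpHelper]
  | succ f ih =>
    by_cases h0 : n = 0
    · simp [tpFreqLoop, tpHelper, h0]
    · have hmn : 0 ≤ PySem.Int.mod n 10 := PySem.Int.mod_nonneg n (by norm_num)
      have hml : PySem.Int.mod n 10 < 10 := PySem.Int.mod_lt n (by norm_num)
      have hq : 0 ≤ PySem.Int.floordiv n 10 := by
        have := PySem.Int.floordiv_mul_add_mod n 10
        nlinarith
      have hd : (PySem.Int.mod n 10).toNat < 10 := by omega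
      rw [show tpFreqLoop (f+1) n freq =
            tpFreqLoop f (PySem.Int.floordiv n 10)
              (freq.set (PySem.Int.mod n 10).toNat
                (freq.getD (PySem.Int.mod n 10).toNat 0 + 1)) from by
            simp only [tpFreqLoop]; rw [if_neg h0]]
      rw [ih (PySem.Int.floordiv n 10) hq _ (by simp [hlen])]
      have hset : (freq.set (PySem.Int.mod n 10).toNat
            (freq.getD (PySem.Int.mod n 10).toNat 0 + 1)).getD j 0
          = freq.getD j 0 + (if PySem.Int.mod n 10 = (j : Int) then 1 else 0) := by
        by_cases he : (PySem.Int.mod n 10).toNat = j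
        · have hmj : PySem.Int.mod n 10 = (j : Int) := by omega
          rw [if_pos hmj, he,
              List.getD_eq_getElem _ _ (by simp [hlen]; omega),
              List.getElem_set_self (by simp [hlen]; omega)]
        · have hmj : PySem.Int.mod n 10 ≠ (j : Int) := by omega
          rw [if_neg hmj, List.getD_eq_getElem?_getD, List.getElem?_set_ne he,
              List.getD_eq_getElem?_getD]
          ring
      rw [hset]
      simp only [tpHelper]
      rw [if_neg h0]
      split <;> ring

theorem ten_pairs_spec : Claim_equal_ten_pairs := by
  intro n _ hpre
  unfold Spec_ten_pairs ten_pairs ten_pairs_alt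
  have hbase : ∀ j : Nat, j < 10 →
      (tpFreqLoop (n.toNat + 1) n (List.replicate 10 0)).getD j 0
        = tpHelper (n.toNat + 1) n (j : Int) := by
    intro j hj
    rw [tpFreq_helper (n.toNat + 1) n hpre _ (by simp) j hj,
        List.getD_eq_getElem _ _ (by simpa using hj),
        List.getElem_replicate]
    ring
  simp only
  rw [hbase 1 (by norm_num), hbase 9 (by norm_num), hbase 2 (by norm_num),
      hbase 8 (by norm_num), hbase 3 (by norm_num), hbase 7 (by norm_num),
      hbase 4 (by norm_num), hbase 6 (by norm_num), hbase 5 (by norm_num)]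
  norm_num
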